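-- pv_equiv track=rewrite | github.com/Elias-desig/wewantCNNs_project | functions.py | layer_dimensions
-- ===== SOURCE A (Python) =====
-- def layer_dimensions(a, b, steps):
--     if steps < 2:
--         raise ValueError("num layer must be at least 2")
--     if b < 1:
--         raise ValueError("Output dimensions must be at least 1")
--     total_diff = b - a
--     num_deltas = steps - 1
--     base_step = total_diff // num_deltas
--     remainder = total_diff % num_deltas
--     # To handle negative remainders correctly
--     if remainder < 0:
--         base_step += 1
--         remainder -= num_deltas
--     # Create deltas
--     deltas = [base_step] * num_deltas
--     for i in range(abs(remainder)):
--         deltas[i] += -1 if remainder < 0 else 1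
--     # Generate the sequence
--     out = [a]
--     for d in deltas:
--         out.append(out[-1] + d)
--     return out
-- ===== SOURCE B (Python) =====
-- def layer_dimensions(a, b, steps):
--     if steps < 2:
--         raise ValueError("num layer must be at least 2")
--     if b < 1:
--         raise ValueError("Output dimensions must be at least 1")
--     num_deltas = steps - 1
--     base_step, remainder = divmod(b - a, num_deltas)
--     return [a + base_step * i + min(i, remainder) for i in range(steps)]
-- ===== Notes on version B (the rewrite author's own statement) =====
-- stated objective: simpler
-- what changed: Replaces the deltas list (repeat, remainder-distribution loop, and running-sum append loop) with a single closed-form comprehension a + base_step*i + min(i, remainder); the dead negative-remainder branch is dropped since Python's % with a positive divisor is nonnegative.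
import Mathlib
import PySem

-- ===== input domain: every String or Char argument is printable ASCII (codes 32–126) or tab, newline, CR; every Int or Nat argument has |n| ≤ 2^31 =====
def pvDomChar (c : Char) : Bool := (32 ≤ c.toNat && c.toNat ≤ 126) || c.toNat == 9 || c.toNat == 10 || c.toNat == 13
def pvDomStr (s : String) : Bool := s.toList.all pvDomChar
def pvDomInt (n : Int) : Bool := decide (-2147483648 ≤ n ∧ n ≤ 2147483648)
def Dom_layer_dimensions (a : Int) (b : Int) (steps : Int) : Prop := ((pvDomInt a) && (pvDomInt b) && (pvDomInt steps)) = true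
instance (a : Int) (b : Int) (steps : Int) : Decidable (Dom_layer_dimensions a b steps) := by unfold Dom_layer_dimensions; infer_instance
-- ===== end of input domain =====

-- B replaces A's delta-list construction and running-sum loop by one closed-form
-- comprehension per index (simpler); A raises ValueError for steps < 2 or b < 1, excluded by Pre_.

-- ===== PORT A =====
def layer_dimensions (a : Int) (b : Int) (steps : Int) : List Int :=
  if steps < 2 then [] else          -- raise ValueError (outside Pre_)
  if b < 1 then [] else              -- raise ValueError (outside Pre_)
  let total_diff := b - a
  let num_deltas := steps - 1
  let base_step := PySem.Int.floordiv total_diff num_deltas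
  let remainder := PySem.Int.mod total_diff num_deltas
  let base_step := if remainder < 0 then base_step + 1 else base_step
  let remainder := if remainder < 0 then remainder - num_deltas else remainder
  let deltas := List.replicate num_deltas.toNat base_step
  -- deltas[i] += -1 if remainder < 0 else 1 : i is always in range here, so set/getD is exact
  let deltas := (List.range remainder.natAbs).foldl
      (fun ds i => ds.set i (ds.getD i 0 + (if remainder < 0 then -1 else 1))) deltas
  deltas.foldl (fun out d => out ++ [out.getLast! + d]) [a]

-- ===== PORT B =====
def layer_dimensions_alt (a : Int) (b : Int) (steps : Int) : List Int :=
  if steps < 2 then [] else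
  if b < 1 then [] else
  let num_deltas := steps - 1
  let base_step := PySem.Int.floordiv (b - a) num_deltas
  let remainder := PySem.Int.mod (b - a) num_deltas
  (PySem.List.pyRange 0 steps 1).map (fun i => a + base_step * i + min i remainder)

-- ===== PRECONDITION & SPEC =====
-- A raises ValueError when steps < 2 or b < 1; exactly those inputs are excluded.
def Pre_layer_dimensions (a : Int) (b : Int) (steps : Int) : Prop := 2 ≤ steps ∧ 1 ≤ b
instance (a : Int) (b : Int) (steps : Int) : Decidable (Pre_layer_dimensions a b steps) := by
  unfold Pre_layer_dimensions; infer_instance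
def pvWitness_layer_dimensions : Int × Int × Int := (3, 10, 4)

def Spec_layer_dimensions (a : Int) (b : Int) (steps : Int) (out : List Int) : Prop := out = layer_dimensions_alt a b steps
instance (a : Int) (b : Int) (steps : Int) (out : List Int) : Decidable (Spec_layer_dimensions a b steps out) := by unfold Spec_layer_dimensions; infer_instance

-- ===== CLAIM (what is proved, stated in full; the proofs are below) =====
def Claim_equal_layer_dimensions : Prop := ∀ (a : Int) (b : Int) (steps : Int), Dom_layer_dimensions a b steps → Pre_layer_dimensions a b steps → Spec_layer_dimensions a b steps (layer_dimensions a b steps)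

-- ===== LEMMAS AND PROOFS =====

-- the remainder-distribution fold turns the replicate list into a closed-form map
theorem deltas_fold_eq (c : Int) : ∀ (r n : Nat), r ≤ n →
    (List.range r).foldl (fun ds i => ds.set i (ds.getD i 0 + 1)) (List.replicate n c)
      = (List.range n).map (fun j => c + if j < r then 1 else 0) := by
  intro r
  induction r with
  | zero =>
    intro n _
    simp
  | succ r ih =>
    intro n hn
    rw [List.range_succ, List.foldl_append, ih n (by omega)]
    simp only [List.foldl_cons, List.foldl_nil]
    have hrn : r < n := by omega
    have hget : ((List.range n).map (fun j => c + if j < r then 1 else 0)).getD r 0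
        = c := by
      rw [List.getD_eq_getElem?_getD]
      simp [hrn]
    rw [hget]
    apply List.ext_getElem
    · simp
    · intro j h1 h2
      simp only [List.length_set, List.length_map, List.length_range] at h1 h2 ⊢
      rw [List.getElem_set]
      by_cases hj : r = j
      · subst hj; simp
      · simp only [hj, if_false]
        simp only [List.getElem_map, List.getElem_range]
        by_cases h : j < r
        · rw [if_pos h, if_pos (by omega)]
        · rw [if_neg h, if_neg (by omega)]

-- the running-sum append loop is a scanl-style prefix sum in closed form
theorem out_fold_eq (bs r : Int) (hr : 0 ≤ r) : ∀ (n : Nat) (pre : List Int) (x : Int),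
    ((List.range n).map (fun (j : Nat) => bs + if (j : Int) < r then 1 else 0)).foldl
        (fun out d => out ++ [out.getLast! + d]) (pre ++ [x])
      = pre ++ (List.range (n + 1)).map (fun (i : Nat) => x + bs * (i : Int) + min (i : Int) r) := by
  intro n
  induction n with
  | zero =>
    intro pre x
    simp [min_eq_left hr]
  | succ n ih =>
    intro pre x
    rw [List.range_succ, List.map_append, List.foldl_append]
    rw [ih pre x]
    simp only [List.map_cons, List.map_nil, List.foldl_cons, List.foldl_nil]
    have hne : (List.range (n + 1)).map (fun (i : Nat) => x + bs * (i : Int) + min (i : Int) r) ≠ [] := by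
      simp
    have hlast : (pre ++ (List.range (n + 1)).map (fun (i : Nat) => x + bs * (i : Int) + min (i : Int) r)).getLast!
        = x + bs * n + min (n : Int) r := by
      rw [List.getLast!_eq_getLast?_getD, List.getLast?_append_of_ne_nil _ hne,
        List.getLast?_eq_getElem?]
      simp
    rw [hlast, List.append_assoc]
    congr 1
    rw [List.range_succ (n := n + 1), List.map_append]
    congr 1
    simp only [List.map_cons, List.map_nil, List.cons.injEq, and_true]
    push_cast
    by_cases h : (n : Int) < r
    · rw [if_pos h, min_eq_left (by omega), min_eq_left (by omega)]; ring
    · rw [if_neg h, min_eq_right (by omega), min_eq_right (by omega)]; ring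

-- ===== VERDICT (by name: the statement is the Claim_ definition above) =====
theorem layer_dimensions_spec : Claim_equal_layer_dimensions := by
  intro a b steps _ hpre
  obtain ⟨hs, hb⟩ := hpre
  have hnd : (0 : Int) < steps - 1 := by omega
  unfold Spec_layer_dimensions layer_dimensions layer_dimensions_alt
  simp only [if_neg (show ¬ steps < 2 by omega), if_neg (show ¬ b < 1 by omega)]
  set r := PySem.Int.mod (b - a) (steps - 1) with hrdef
  have hr0 : 0 ≤ r := by
    rw [hrdef, PySem.Int.mod_eq_emod_of_pos hnd]
    exact Int.emod_nonneg _ (by omega)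
  have hrlt : r < steps - 1 := by
    rw [hrdef, PySem.Int.mod_eq_emod_of_pos hnd]
    exact Int.emod_lt_of_pos _ hnd
  set bs := PySem.Int.floordiv (b - a) (steps - 1) with hbsdef
  have hnr : ¬ r < 0 := by omega
  simp only [if_neg hnr]
  have hle : r.natAbs ≤ (steps - 1).toNat := by omega
  rw [deltas_fold_eq bs r.natAbs (steps - 1).toNat hle]
  have h2 : (fun j : Nat => bs + if j < r.natAbs then 1 else 0)
      = fun j : Nat => bs + if (j : Int) < r then 1 else 0 := by
    funext j
    congr 1
    by_cases h : j < r.natAbs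
    · rw [if_pos h, if_pos (by omega)]
    · rw [if_neg h, if_neg (by omega)]
  rw [h2]
  have h3 := out_fold_eq bs r hr0 (steps - 1).toNat [] a
  simp only [List.nil_append] at h3
  rw [h3, PySem.List.pyRange_one]
  have h4 : (steps - 1).toNat + 1 = (steps - 0).toNat := by omega
  rw [h4, List.map_map]
  apply List.map_congr_left
  intro k _
  simp only [Function.comp_apply, zero_add]
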